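-- pv_equiv track=rewrite | github.com/FabLetizia/Progetto_Finale_IDD | src/source_preprocessing.py | string_list_to_string
-- ===== SOURCE A (Python) =====
-- def string_list_to_string(column):
--     new_col = list()
--     for string in column:
--         string = string.replace('\'', '')
--         string = string.replace('[', '')
--         string = string.replace(']', '')
--         new_col.append(string)
--     return new_col
-- ===== SOURCE B (Python) =====
-- def string_list_to_string(column):
--     bad = {'\'', '[', ']'}
--     return [''.join(c for c in s if c not in bad) for s in column]
-- ===== Notes on version B (the rewrite author's own statement) =====
-- stated objective: idiomatic
-- what changed: Replaces the three sequential full-string .replace scans per element with one character-filtering pass per element that drops any of the three characters.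
import Mathlib
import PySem

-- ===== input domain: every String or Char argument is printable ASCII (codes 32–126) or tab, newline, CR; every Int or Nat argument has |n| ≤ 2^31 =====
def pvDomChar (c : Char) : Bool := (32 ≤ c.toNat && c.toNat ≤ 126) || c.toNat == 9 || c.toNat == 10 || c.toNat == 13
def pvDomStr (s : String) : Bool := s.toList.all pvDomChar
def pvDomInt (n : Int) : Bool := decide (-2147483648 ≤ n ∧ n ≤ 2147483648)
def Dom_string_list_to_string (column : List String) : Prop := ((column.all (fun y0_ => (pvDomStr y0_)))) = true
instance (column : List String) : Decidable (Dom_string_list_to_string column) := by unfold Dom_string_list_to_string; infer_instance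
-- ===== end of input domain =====

-- B replaces A's three sequential full-string .replace passes per element by a single
-- character-filtering pass per element (same return value; objective: idiomatic).

-- ===== PORT A =====
-- literal port of A: accumulator loop, three replace calls per string
def string_list_to_string (column : List String) : List String :=
  column.foldl
    (fun new_col string =>
      let s1 := PySem.Str.replace string "'" ""
      let s2 := PySem.Str.replace s1 "[" ""
      let s3 := PySem.Str.replace s2 "]" ""
      new_col ++ [s3])
    []

-- ===== PORT B =====
-- literal port of B: list comprehension with a per-character filter
def string_list_to_string_alt (column : List String) : List String :=
  column.map (fun s =>
    String.ofList (s.toList.filter (fun c => !(c == '\'' || c == '[' || c == ']'))))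

-- ===== PRECONDITION & SPEC =====
def Spec_string_list_to_string (column : List String) (out : List String) : Prop := out = string_list_to_string_alt column
instance (column : List String) (out : List String) : Decidable (Spec_string_list_to_string column out) := by unfold Spec_string_list_to_string; infer_instance

-- ===== CLAIM (what is proved, stated in full; the proofs are below) =====
def Claim_equal_string_list_to_string : Prop := ∀ (column : List String), Dom_string_list_to_string column → Spec_string_list_to_string column (string_list_to_string column)

-- ===== LEMMAS AND PROOFS =====

-- single-character deletion replace = filter
theorem replace_go_single (ch : Char) :
    ∀ (fuel : Nat) (l acc : List Char), l.length ≤ fuel →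
      PySem.Chars.replace.go [ch] [] fuel l acc = acc.reverse ++ l.filter (fun c => !(c == ch)) := by
  intro fuel
  induction fuel with
  | zero =>
    intro l acc h
    have : l = [] := List.eq_nil_of_length_eq_zero (Nat.le_zero.mp h)
    subst this
    simp [PySem.Chars.replace.go]
  | succ n ih =>
    intro l acc h
    cases l with
    | nil => simp [PySem.Chars.replace.go]
    | cons c t =>
      simp only [PySem.Chars.replace.go]
      by_cases hc : c = ch
      · subst hc
        have hp : List.isPrefixOf [c] (c :: t) = true := by simp [List.isPrefixOf]
        simp only [hp, if_pos]
        rw [show List.drop (List.length [c]) (c :: t) = t by simp]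
        rw [ih t _ (by simpa using Nat.le_of_succ_le_succ h)]
        simp
      · have hp : List.isPrefixOf [ch] (c :: t) = false := by
          simp [List.isPrefixOf]; exact fun hh => absurd hh.symm hc
        simp only [hp]
        rw [if_neg (by simp)]
        rw [ih t _ (by simpa using Nat.le_of_succ_le_succ h)]
        simp [hc]

theorem replace_single (ch : Char) (s : List Char) :
    PySem.Chars.replace s [ch] [] = s.filter (fun c => !(c == ch)) := by
  rw [PySem.Chars.replace]
  simp only [List.isEmpty_cons, Bool.false_eq_true, if_false]
  simpa using replace_go_single ch s.length s [] (le_refl _)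

theorem per_string (s : String) :
    PySem.Str.replace (PySem.Str.replace (PySem.Str.replace s "'" "") "[" "") "]" ""
      = String.ofList (s.toList.filter (fun c => !(c == '\'' || c == '[' || c == ']'))) := by
  simp only [PySem.Str.replace, String.toList_ofList]
  rw [show ("'" : String).toList = ['\''] from rfl, show ("[" : String).toList = ['['] from rfl,
      show ("]" : String).toList = [']'] from rfl, show ("" : String).toList = [] from rfl]
  rw [replace_single, replace_single, replace_single, List.filter_filter, List.filter_filter]
  apply congrArg
  apply List.filter_congr
  intro c _
  by_cases h1 : c = '\'' <;> by_cases h2 : c = '[' <;> by_cases h3 : c = ']' <;> simp [h1, h2, h3, Bool.and_comm, Bool.and_assoc]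

theorem foldl_append_map {α β : Type} (f : α → β) :
    ∀ (l : List α) (acc : List β), l.foldl (fun r x => r ++ [f x]) acc = acc ++ l.map f := by
  intro l
  induction l with
  | nil => simp
  | cons x t ih => intro acc; simp [List.foldl, ih]

-- ===== VERDICT (by name: the statement is the Claim_ definition above) =====
theorem string_list_to_string_spec : Claim_equal_string_list_to_string := by
  intro column _
  unfold Spec_string_list_to_string string_list_to_string string_list_to_string_alt
  rw [foldl_append_map]
  simp only [List.nil_append]
  exact List.map_congr_left fun s _ => per_string s
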